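-- pv_equiv track=rewrite | github.com/eXtc-be/AdventOfCode | 2017/09/aoc_2017_09_A_1.py | _find_garbage
-- ===== SOURCE A (Python) =====
-- def _find_garbage(string: str) -> tuple[int, int]:
--     start = stop = -1
--     cancel_next = False
--
--     for i, char in enumerate(string):
--         if start < 0:
--             if char == '<':
--                 start = i
--         else:
--             if cancel_next:
--                 cancel_next = False
--                 continue
--             match char:
--                 case '>':
--                     stop = i+1
--                     break
--                 case '!':
--                     cancel_next = True
--
--     return start, stop
-- ===== SOURCE B (Python) =====
-- def _find_garbage(string: str) -> tuple[int, int]: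
--     # Two-phase: find '<' and then successive candidate '>' characters with
--     # str.find, accepting the first one preceded by an even-length run of '!'.
--     start = string.find('<')
--     stop = -1
--     if start >= 0:
--         p = string.find('>', start + 1)
--         while p != -1:
--             q = p
--             while q - 1 > start and string[q - 1] == '!':
--                 q -= 1
--             if (p - q) % 2 == 0:
--                 stop = p + 1
--                 break
--             p = string.find('>', p + 1)
--     return start, stop
-- ===== Notes on version B (the rewrite author's own statement) =====
-- stated objective: faster
-- what changed: Instead of A's single character-by-character state machine with a cancel_next flag, B finds '<' with str.find, then repeatedly jumps with str.find('>', p) to candidate closers and accepts the first one whose immediately preceding run of '!' characters (counted backwards, bounded by the start index) has even length.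
import Mathlib
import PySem

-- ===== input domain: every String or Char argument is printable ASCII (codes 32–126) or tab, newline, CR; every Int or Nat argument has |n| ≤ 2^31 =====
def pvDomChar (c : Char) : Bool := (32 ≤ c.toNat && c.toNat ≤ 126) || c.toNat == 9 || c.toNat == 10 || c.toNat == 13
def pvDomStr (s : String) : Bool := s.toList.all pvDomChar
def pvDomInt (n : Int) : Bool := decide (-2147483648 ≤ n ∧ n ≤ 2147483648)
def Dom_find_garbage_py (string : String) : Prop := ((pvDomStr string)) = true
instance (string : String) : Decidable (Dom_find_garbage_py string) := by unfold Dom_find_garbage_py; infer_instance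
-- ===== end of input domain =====

-- B replaces A's single forward state machine (cancel_next flag) by str.find for the
-- start plus repeated str.find('>', p) candidate jumps, accepting the first '>' whose
-- backward run of '!' has even length (objective: constant-factor speedup via C-level str.find jumps).

-- ===== PORT A =====
-- A's for-loop over enumerate(string) with state (start, stop, cancel_next) and break
def findGarbageA : List Char → Nat → Int → Int → Bool → Int × Int
  | [], _, start, stop, _ => (start, stop)
  | c :: rest, i, start, stop, cancel =>
    if start < 0 then
      if c = '<' then findGarbageA rest (i+1) (i : Int) stop cancel
      else findGarbageA rest (i+1) start stop cancel
    else
      if cancel then findGarbageA rest (i+1) start stop false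
      else if c = '>' then (start, (i : Int) + 1)
      else if c = '!' then findGarbageA rest (i+1) start stop true
      else findGarbageA rest (i+1) start stop cancel

def find_garbage_py (string : String) : Int × Int :=
  findGarbageA string.toList 0 (-1) (-1) false

-- ===== PORT B =====
-- B's inner while loop: decrement q while q-1 > start and string[q-1] == '!'
-- (structural recursion on q; the q = 0 arm is only reached when the while
-- condition is false, since start ≥ 0 whenever B runs this loop)
def bRunQ (s : List Char) (start : Int) : Nat → Nat
  | 0 => 0
  | q' + 1 => if start < (q' : Int) ∧ s.getD q' ' ' = '!' then bRunQ s start q' else q' + 1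

-- B's outer while loop: p = string.find('>', from); accept if the '!' run before p is
-- even, else continue from p+1 (the from_ > length arm mirrors Python's find = -1 there)
def bScan (s : List Char) (start : Int) (from_ : Nat) : Int :=
  if hle : from_ ≤ s.length then
    let p := PySem.Chars.findFrom s ['>'] (from_ : Int) none
    if hp : p ≠ -1 then
      if (p.toNat - bRunQ s start p.toNat) % 2 = 0 then p + 1
      else bScan s start (p.toNat + 1)
    else -1
  else -1
termination_by s.length + 1 - from_
decreasing_by
  have h := (PySem.Chars.findFrom_natCast_spec s ['>'] from_ hle hp).1
  omega

def find_garbage_py_alt (string : String) : Int × Int :=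
  let start := PySem.Str.find string "<"
  if 0 ≤ start then (start, bScan string.toList start (start.toNat + 1))
  else (start, -1)

-- ===== PRECONDITION & SPEC =====
def Spec_find_garbage_py (string : String) (out : Int × Int) : Prop := out = find_garbage_py_alt string
instance (string : String) (out : Int × Int) : Decidable (Spec_find_garbage_py string out) := by unfold Spec_find_garbage_py; infer_instance

-- ===== CLAIM (what is proved, stated in full; the proofs are below) =====
def Claim_equal_find_garbage_py : Prop := ∀ (string : String), Dom_find_garbage_py string → Spec_find_garbage_py string (find_garbage_py string)

-- ===== LEMMAS AND PROOFS =====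

-- proof-side helper: the stop index as a stride-2 scan (what A's phase-2 loop computes)
def strideStop (s : List Char) (i : Nat) : Int :=
  if h : i < s.length then
    if s[i] = '>' then (i : Int) + 1
    else if s[i] = '!' then strideStop s (i+2)
    else strideStop s (i+1)
  else -1
termination_by s.length - i

-- proof-side helper: first index j ≥ i holding '>' with an even '!'-run, as B computes it
def firstStop (s : List Char) (start : Int) (i : Nat) : Int :=
  if h : i < s.length then
    if s[i] = '>' ∧ (i - bRunQ s start i) % 2 = 0 then (i : Int) + 1
    else firstStop s start (i+1)
  else -1
termination_by s.length - i

theorem bRunQ_le (s : List Char) (start : Int) (q : Nat) : bRunQ s start q ≤ q := by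
  induction q with
  | zero => simp [bRunQ]
  | succ q' ih => simp only [bRunQ]; split <;> omega

-- phase 0: no '<' anywhere → A returns (-1, -1)
theorem findGarbageA_no_lt (l : List Char) (i : Nat) (h : '<' ∉ l) :
    findGarbageA l i (-1) (-1) false = (-1, -1) := by
  induction l generalizing i with
  | nil => rfl
  | cons c rest ih =>
    simp only [List.mem_cons, not_or] at h
    simp only [findGarbageA]
    rw [if_pos (by norm_num), if_neg (by exact fun hc => h.1 hc.symm)]
    exact ih _ h.2

-- cancel_next = true consumes one character and resets the flag (start ≥ 0 branch)
theorem findGarbageA_cancel (l : List Char) (i : Nat) (start stop : Int) (hs : ¬ start < 0) :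
    findGarbageA l i start stop true = findGarbageA l.tail (i+1) start stop false := by
  cases l with
  | nil => rfl
  | cons c rest => simp [findGarbageA, hs]

-- phase 2: after '<' was found at some index, A's scan equals the stride loop
theorem findGarbageA_phase2 (s : List Char) (start : Int) (hs : ¬ start < 0) :
    ∀ i, findGarbageA (s.drop i) i start (-1) false = (start, strideStop s i) := by
  intro i
  induction hn : s.length - i using Nat.strong_induction_on generalizing i with
  | _ n ih =>
  by_cases hi : i < s.length
  · rw [← List.getElem_cons_drop hi]
    simp only [findGarbageA, if_neg hs, Bool.false_eq_true, if_false]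
    rw [strideStop]
    simp only [hi, dif_pos]
    by_cases hgt : s[i] = '>'
    · simp [hgt]
    · rw [if_neg hgt, if_neg hgt]
      by_cases hbang : s[i] = '!'
      · rw [if_pos hbang, if_pos hbang, findGarbageA_cancel _ _ _ _ hs, List.tail_drop]
        exact ih _ (by omega) (i+2) rfl
      · rw [if_neg hbang, if_neg hbang]
        exact ih _ (by omega) (i+1) rfl
  · rw [List.drop_eq_nil_of_le (by omega), strideStop]
    simp [findGarbageA, hi]

-- phase 1: scanning up to the first '<' at index j
theorem findGarbageA_phase1 (s : List Char) (j : Nat) (hj : j < s.length)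
    (hjc : s[j] = '<') (hmin : ∀ k, (hk : k < s.length) → k < j → s[k] ≠ '<') :
    ∀ d i, i + d = j → findGarbageA (s.drop i) i (-1) (-1) false
      = findGarbageA (s.drop (j+1)) (j+1) (j : Int) (-1) false := by
  intro d
  induction d with
  | zero =>
    intro i hij
    have hi : i = j := by omega
    subst hi
    rw [← List.getElem_cons_drop hj]
    simp [findGarbageA, hjc]
  | succ d ihd =>
    intro i hij
    have hi : i < s.length := by omega
    rw [← List.getElem_cons_drop hi]
    simp only [findGarbageA]
    rw [if_pos (by norm_num), if_neg (hmin i hi (by omega))]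
    exact ihd (i+1) (by omega)

-- a singleton is an infix iff its element is a member
theorem singleton_infix_iff_mem (a : Char) (l : List Char) : [a] <:+: l ↔ a ∈ l := by
  constructor
  · intro h
    exact (List.singleton_sublist).1 h.sublist
  · intro h
    obtain ⟨u, v, huv⟩ := List.append_of_mem h
    exact ⟨u, v, by simp [huv]⟩

-- a singleton is a prefix of s.drop i iff s[i] is that element
theorem singleton_prefix_drop (a : Char) (s : List Char) (i : Nat) (hi : i < s.length) :
    [a] <+: s.drop i ↔ s[i] = a := by
  rw [← List.getElem_cons_drop hi]
  constructor
  · rintro ⟨t, ht⟩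
    exact ((List.cons_eq_cons.mp ht.symm).1).symm ▸ rfl
  · intro h
    exact ⟨s.drop (i+1), by rw [h]; rfl⟩

-- the stride loop equals the even-run first-match, at any index with an even pending run
theorem strideStop_eq_firstStop (s : List Char) (start : Int) :
    ∀ i, (i - bRunQ s start i) % 2 = 0 → start < (i : Int) →
      strideStop s i = firstStop s start i := by
  intro i
  induction hn : s.length - i using Nat.strong_induction_on generalizing i with
  | _ n ih =>
  intro he hlt
  by_cases hi : i < s.length
  · rw [strideStop, firstStop]
    simp only [hi, dif_pos]
    by_cases hgt : s[i] = '>'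
    · rw [if_pos hgt, if_pos ⟨hgt, he⟩]
    · rw [if_neg hgt]
      conv_rhs => rw [if_neg (show ¬(s[i] = '>' ∧ (i - bRunQ s start i) % 2 = 0) from fun hc => hgt hc.1)]
      by_cases hbang : s[i] = '!'
      · rw [if_pos hbang]
        have hq1 : bRunQ s start (i+1) = bRunQ s start i := by
          simp only [bRunQ]
          rw [if_pos ⟨hlt, by simp [List.getD_eq_getElem?_getD, hi, hbang]⟩]
        have hle := bRunQ_le s start i
        -- firstStop skips i (not '>') and i+1 (odd run there)
        have hskip : firstStop s start (i+1) = firstStop s start (i+2) := by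
          rw [firstStop]
          by_cases hi1 : i+1 < s.length
          · simp only [hi1, dif_pos]
            rw [if_neg]
            rintro ⟨_, hpar⟩
            rw [hq1] at hpar
            omega
          · rw [dif_neg hi1, firstStop, dif_neg (by omega)]
        rw [hskip]
        have he2 : (i+2 - bRunQ s start (i+2)) % 2 = 0 := by
          by_cases hi1 : i+1 < s.length
          · by_cases hb1 : s[i+1] = '!'
            · have : bRunQ s start (i+2) = bRunQ s start (i+1) := by
                simp only [bRunQ]
                rw [if_pos ⟨by omega, by simp [List.getD_eq_getElem?_getD, hi1, hb1]⟩]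
              rw [this, hq1]
              have := bRunQ_le s start (i+1)
              omega
            · have : bRunQ s start (i+2) = i+2 := by
                simp only [bRunQ]
                rw [if_neg]
                rintro ⟨_, hg⟩
                exact hb1 (by simpa [List.getD_eq_getElem?_getD, hi1] using hg)
              omega
          · have : bRunQ s start (i+2) = i+2 := by
              simp only [bRunQ]
              rw [if_neg]
              rintro ⟨_, hg⟩
              rw [List.getD_eq_getElem?_getD, List.getElem?_eq_none (by omega)] at hg
              simp at hg
            omega
        exact ih _ (by omega) (i+2) rfl he2 (by omega)
      · rw [if_neg hbang]
        have he1 : (i+1 - bRunQ s start (i+1)) % 2 = 0 := by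
          have : bRunQ s start (i+1) = i+1 := by
            simp only [bRunQ]
            rw [if_neg]
            rintro ⟨_, hg⟩
            exact hbang (by simpa [List.getD_eq_getElem?_getD, hi] using hg)
          omega
        exact ih _ (by omega) (i+1) rfl he1 (by omega)
  · rw [strideStop, firstStop, dif_neg hi, dif_neg hi]

-- firstStop skips indices that do not hold '>'
theorem firstStop_skip (s : List Char) (start : Int) (i p : Nat) (hip : i ≤ p)
    (hno : ∀ j, i ≤ j → j < p → (hj : j < s.length) → s[j] ≠ '>') :
    firstStop s start i = firstStop s start p := by
  induction hd : p - i generalizing i with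
  | zero => have : i = p := by omega
            rw [this]
  | succ d ihd =>
    rw [firstStop]
    by_cases hi : i < s.length
    · rw [dif_pos hi, if_neg (fun hc => hno i le_rfl (by omega) hi hc.1)]
      exact ihd (i+1) (by omega) (fun j h1 h2 hj => hno j (by omega) h2 hj) (by omega)
    · rw [dif_neg hi]
      have : firstStop s start p = -1 := by rw [firstStop, dif_neg (by omega)]
      rw [this]

-- firstStop is -1 when no '>' occurs from i on
theorem firstStop_none (s : List Char) (start : Int) (i : Nat)
    (hno : ∀ j, i ≤ j → (hj : j < s.length) → s[j] ≠ '>') :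
    firstStop s start i = -1 := by
  induction hn : s.length - i using Nat.strong_induction_on generalizing i with
  | _ n ih =>
  rw [firstStop]
  by_cases hi : i < s.length
  · rw [dif_pos hi, if_neg (fun hc => hno i le_rfl hi hc.1)]
    exact ih _ (by omega) (i+1) (fun j h1 hj => hno j (by omega) hj) rfl
  · rw [dif_neg hi]

-- B's find-driven outer loop computes firstStop
theorem bScan_eq_firstStop (s : List Char) (start : Int) :
    ∀ from_ : Nat, bScan s start from_ = firstStop s start from_ := by
  intro from_
  induction hn : s.length + 1 - from_ using Nat.strong_induction_on generalizing from_ with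
  | _ n ih =>
  rw [bScan]
  by_cases hle : from_ ≤ s.length
  · rw [dif_pos hle]
    set p := PySem.Chars.findFrom s ['>'] (from_ : Int) none with hp
    by_cases hpn : p ≠ -1
    · obtain ⟨h1, h2, h3⟩ := PySem.Chars.findFrom_natCast_spec s ['>'] from_ hle hpn
      have hplen : p.toNat < s.length := by
        rcases h2 with ⟨t, ht⟩
        have := congrArg List.length ht
        simp only [List.length_append, List.length_cons, List.length_nil, List.length_drop] at this
        omega
      have hpc : s[p.toNat] = '>' := (singleton_prefix_drop '>' s p.toNat hplen).1 h2
      have hmin : ∀ j, from_ ≤ j → j < p.toNat → (hj : j < s.length) → s[j] ≠ '>' := by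
        intro j hj1 hj2 hj hc
        exact h3 j (by exact_mod_cast hj1) (by omega) ((singleton_prefix_drop '>' s j hj).2 hc)
      rw [dif_pos hpn]
      rw [firstStop_skip s start from_ p.toNat (by omega) hmin]
      rw [firstStop, dif_pos hplen]
      by_cases hpar : (p.toNat - bRunQ s start p.toNat) % 2 = 0
      · rw [if_pos hpar]
        conv_rhs => rw [if_pos (⟨hpc, hpar⟩ : s[p.toNat] = '>' ∧ (p.toNat - bRunQ s start p.toNat) % 2 = 0)]
        have h0 : (0:Int) ≤ p := le_trans (Int.natCast_nonneg from_) h1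
        omega
      · rw [if_neg hpar, if_neg (fun hc => hpar hc.2)]
        exact ih (s.length + 1 - (p.toNat + 1)) (by omega) (p.toNat + 1) rfl
    · rw [dif_neg hpn]
      have hninf : ¬ ['>'] <:+: s.drop from_ :=
        (PySem.Chars.findFrom_natCast_eq_neg_one_iff s ['>'] from_ hle).1 (not_not.mp hpn)
      rw [singleton_infix_iff_mem] at hninf
      refine (firstStop_none s start from_ ?_).symm
      intro j hj1 hj hc
      exact hninf (by rw [← hc]; exact List.mem_iff_getElem.2 ⟨j - from_, by simp; omega, by
        rw [List.getElem_drop]; congr 1; omega⟩)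
  · rw [dif_neg hle, firstStop_none s start from_ (fun j hj1 hj => by omega)]

-- ===== VERDICT (by name: the statement is the Claim_ definition above) =====
theorem find_garbage_py_spec : Claim_equal_find_garbage_py := by
  intro string _
  unfold Spec_find_garbage_py find_garbage_py find_garbage_py_alt
  have hfind : PySem.Str.find string "<" = PySem.Chars.find string.toList ['<'] := by
    simp [PySem.Str.find_eq]
  rw [hfind]
  by_cases hpos : 0 ≤ PySem.Chars.find string.toList ['<']
  · simp only [if_pos hpos]
    obtain ⟨hpre, hminp⟩ := PySem.Chars.find_spec (s := string.toList) (sub := ['<']) hpos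
    set j := (PySem.Chars.find string.toList ['<']).toNat with hjdef
    obtain ⟨t, ht⟩ := hpre
    have hj : j < string.toList.length := by
      have h3 := congrArg List.length ht
      simp only [List.length_append, List.length_cons, List.length_nil, List.length_drop] at h3
      have hle := PySem.Chars.find_le_length (s := string.toList) (sub := ['<'])
      omega
    have hjc : string.toList[j] = '<' := by
      have h2 : string.toList[j] :: string.toList.drop (j+1) = '<' :: t := by
        rw [List.getElem_cons_drop hj, ← ht]; rfl
      exact (List.cons_eq_cons.mp h2).1
    have hmin : ∀ k, (hk : k < string.toList.length) → k < j → string.toList[k] ≠ '<' := by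
      intro k hk hkj hc
      apply hminp k hkj
      exact ⟨string.toList.drop (k+1), by rw [← hc]; simp [List.getElem_cons_drop hk]⟩
    have h1 := findGarbageA_phase1 string.toList j hj hjc hmin j 0 (by omega)
    rw [List.drop_zero] at h1
    rw [h1, findGarbageA_phase2 string.toList (j : Int) (by omega) (j+1)]
    have hq0 : bRunQ string.toList (j : Int) (j+1) = j+1 := by
      simp only [bRunQ]
      rw [if_neg]
      rintro ⟨hg, _⟩
      omega
    rw [strideStop_eq_firstStop string.toList (j : Int) (j+1) (by omega) (by omega),
        ← bScan_eq_firstStop]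
    have hji : ((j : Int)) = PySem.Chars.find string.toList ['<'] := by omega
    rw [hji]
  · simp only [if_neg hpos]
    have hm1 : PySem.Chars.find string.toList ['<'] = -1 := by
      have := PySem.Chars.neg_one_le_find (s := string.toList) (sub := ['<'])
      omega
    have hnmem : '<' ∉ string.toList := by
      intro hmem
      exact (PySem.Chars.find_eq_neg_one_iff (s := string.toList) (sub := ['<'])).1 hm1
        ((singleton_infix_iff_mem '<' string.toList).2 hmem)
    rw [findGarbageA_no_lt string.toList 0 hnmem, hm1]
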